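-- pv_equiv track=rewrite | github.com/KsenyaNikitchenko/laboraatornaya1 | task15-19 match.py | mininrange
-- ===== SOURCE A (Python) =====
-- def mininrange(mas,a,b):
--     mas.sort()
--     min=mas[-1]
--     for i in range(len(mas)):
--         if(a<=mas[i]<=b and mas[i]<=min):
--             min =mas[i]
--     if(min==mas[-1] and not a<=min<=b):
--         return 0
--     else:
--         return mas.count(min)
-- ===== SOURCE B (Python) =====
-- def mininrange(mas, a, b):
--     # keep A's observable side effect: mas is sorted in place
--     mas.sort()
--     vals = [x for x in mas if a <= x <= b]
--     if not vals:
--         return 0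
--     return vals.count(min(vals))
-- ===== Notes on version B (the rewrite author's own statement) =====
-- stated objective: simpler
-- what changed: A scans indices with a sentinel min seeded from mas[-1] and then re-checks a guard against mas[-1] before a separate .count pass; B filters the in-range values, takes their min and counts it directly, with no sentinel and no guard.
import Mathlib
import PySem

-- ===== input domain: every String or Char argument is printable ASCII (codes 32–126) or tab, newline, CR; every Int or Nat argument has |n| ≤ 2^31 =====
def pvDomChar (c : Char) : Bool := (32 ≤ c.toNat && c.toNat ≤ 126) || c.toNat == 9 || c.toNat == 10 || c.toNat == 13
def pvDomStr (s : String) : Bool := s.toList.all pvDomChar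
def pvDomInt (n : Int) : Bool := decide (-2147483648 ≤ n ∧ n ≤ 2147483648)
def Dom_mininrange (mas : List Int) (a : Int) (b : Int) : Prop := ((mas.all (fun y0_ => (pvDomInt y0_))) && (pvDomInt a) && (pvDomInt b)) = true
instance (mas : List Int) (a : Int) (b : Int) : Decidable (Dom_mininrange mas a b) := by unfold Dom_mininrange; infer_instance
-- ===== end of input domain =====

-- B replaces A's sentinel min-scan plus guarded .count with filter/min/count (simpler decomposition);
-- both A and B sort mas in place, so the side effect is identical; the equivalence proved is about the return value.

-- ===== PORT A =====
def mininrange (mas : List Int) (a : Int) (b : Int) : Int :=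
  let s := PySem.List.sorted mas (fun x => x) false
  let m0 := PySem.List.pyGetD s (-1) 0
  let m := (PySem.List.pyRange 0 (s.length : Int) 1).foldl
      (fun mn i =>
        if a ≤ PySem.List.pyGetD s i 0 ∧ PySem.List.pyGetD s i 0 ≤ b ∧ PySem.List.pyGetD s i 0 ≤ mn
        then PySem.List.pyGetD s i 0 else mn) m0
  if m = PySem.List.pyGetD s (-1) 0 ∧ ¬ (a ≤ m ∧ m ≤ b) then 0
  else (PySem.List.count s m : Int)

-- ===== PORT B =====
def mininrange_alt (mas : List Int) (a : Int) (b : Int) : Int :=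
  let s := PySem.List.sorted mas (fun x => x) false
  let vals := s.filter (fun x => decide (a ≤ x) && decide (x ≤ b))
  match PySem.List.min? vals (fun x => x) with
  | none => 0
  | some v => (PySem.List.count vals v : Int)

-- ===== PRECONDITION & SPEC =====
-- Pre_ excludes only the empty list, on which A raises IndexError at mas[-1].
def Pre_mininrange (mas : List Int) (a : Int) (b : Int) : Prop := mas ≠ []
instance (mas : List Int) (a : Int) (b : Int) : Decidable (Pre_mininrange mas a b) := by unfold Pre_mininrange; infer_instance
def pvWitness_mininrange : List Int × Int × Int := ([3, 1, 2, 1], 1, 2)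

def Spec_mininrange (mas : List Int) (a : Int) (b : Int) (out : Int) : Prop := out = mininrange_alt mas a b
instance (mas : List Int) (a : Int) (b : Int) (out : Int) : Decidable (Spec_mininrange mas a b out) := by unfold Spec_mininrange; infer_instance

-- ===== CLAIM (what is proved, stated in full; the proofs are below) =====
def Claim_equal_mininrange : Prop := ∀ (mas : List Int) (a : Int) (b : Int), Dom_mininrange mas a b → Pre_mininrange mas a b → Spec_mininrange mas a b (mininrange mas a b)

-- ===== LEMMAS AND PROOFS =====

-- every element of a (·≤·)-pairwise list is ≤ its last element
theorem le_getLast_of_pairwise (l : List Int) (h : l.Pairwise (· ≤ ·)) (hne : l ≠ []) :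
    ∀ x ∈ l, x ≤ l.getLast hne := by
  induction l with
  | nil => simp
  | cons y t ih =>
    intro x hx
    rcases List.pairwise_cons.mp h with ⟨hy, ht⟩
    cases t with
    | nil =>
      have hxy : x = y := by simpa using hx
      simp [hxy]
    | cons z u =>
      rcases List.mem_cons.mp hx with hx | hx
      · subst hx
        have := hy _ (List.getLast_mem (l := z :: u) (by simp))
        simpa [List.getLast_cons] using this
      · simpa [List.getLast_cons] using ih ht (by simp) x hx

-- A's loop leaves the accumulator alone once it is ≤ every remaining element
theorem fold_const (a b : Int) (t : List Int) (mn : Int) (h : ∀ y ∈ t, mn ≤ y) :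
    t.foldl (fun mn x => if a ≤ x ∧ x ≤ b ∧ x ≤ mn then x else mn) mn = mn := by
  induction t with
  | nil => rfl
  | cons y u ih =>
    have hy : mn ≤ y := h y (by simp)
    have step : (if a ≤ y ∧ y ≤ b ∧ y ≤ mn then y else mn) = mn := by
      split_ifs with hc
      · omega
      · rfl
    simp only [List.foldl_cons, step]
    exact ih (fun z hz => h z (by simp [hz]))

-- on a sorted list, A's loop computes the first in-range element (or keeps mn)
theorem fold_find (a b : Int) (s : List Int) (mn : Int)
    (hs : s.Pairwise (· ≤ ·)) (hmn : ∀ x ∈ s, x ≤ mn) :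
    s.foldl (fun mn x => if a ≤ x ∧ x ≤ b ∧ x ≤ mn then x else mn) mn
      = (s.find? (fun x => decide (a ≤ x) && decide (x ≤ b))).getD mn := by
  induction s generalizing mn with
  | nil => rfl
  | cons x t ih =>
    rcases List.pairwise_cons.mp hs with ⟨hx, ht⟩
    by_cases hp : a ≤ x ∧ x ≤ b
    · have hxmn : x ≤ mn := hmn x (by simp)
      have step : (if a ≤ x ∧ x ≤ b ∧ x ≤ mn then x else mn) = x := by
        simp [hp.1, hp.2, hxmn]
      simp only [List.foldl_cons, step, List.find?_cons]
      rw [fold_const a b t x hx]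
      simp [hp.1, hp.2]
    · have step : (if a ≤ x ∧ x ≤ b ∧ x ≤ mn then x else mn) = mn := by
        split_ifs with hc
        · exact absurd ⟨hc.1, hc.2.1⟩ hp
        · rfl
      simp only [List.foldl_cons, step, List.find?_cons]
      have hpx : (decide (a ≤ x) && decide (x ≤ b)) = false := by
        simp only [Bool.and_eq_false_iff, decide_eq_false_iff_not]
        by_cases h1 : a ≤ x
        · exact Or.inr (fun h2 => hp ⟨h1, h2⟩)
        · exact Or.inl h1
      rw [hpx]
      exact ih mn ht (fun y hy => hmn y (List.mem_cons_of_mem _ hy))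

-- find? = head? of filter
theorem find?_eq_head?_filter (p : Int → Bool) (l : List Int) :
    l.find? p = (l.filter p).head? := by
  induction l with
  | nil => rfl
  | cons x t ih =>
    by_cases hp : p x = true
    · rw [List.find?_cons_of_pos hp, List.filter_cons_of_pos hp, List.head?_cons]
    · simp only [Bool.not_eq_true] at hp
      rw [List.find?_cons_of_neg (by simp [hp]), List.filter_cons_of_neg (by simp [hp]), ih]

-- ===== VERDICT (by name: the statement is the Claim_ definition above) =====
theorem mininrange_spec : Claim_equal_mininrange := by
  intro mas a b _ hpre
  unfold Spec_mininrange mininrange mininrange_alt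
  simp only []
  set s := PySem.List.sorted mas (fun x => x) false with hsdef
  have hsne : s ≠ [] := by
    rw [hsdef, Ne, PySem.List.sorted_eq_nil_iff]; exact hpre
  have hs : s.Pairwise (· ≤ ·) := by
    simpa using PySem.List.sorted_pairwise (xs := mas) (key := fun x => x)
  have hlast : PySem.List.pyGetD s (-1) 0 = s.getLast hsne :=
    PySem.List.pyGetD_neg_one s 0 hsne
  have hmax : ∀ x ∈ s, x ≤ s.getLast hsne := le_getLast_of_pairwise s hs hsne
  -- rewrite A's loop over pyRange into a foldl over s
  rw [PySem.List.foldl_pyRange_zero_pyGetD' s 0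
      (fun mn x => if a ≤ x ∧ x ≤ b ∧ x ≤ mn then x else mn) (PySem.List.pyGetD s (-1) 0)]
  rw [hlast, fold_find a b s _ hs hmax]
  set p : Int → Bool := fun x => decide (a ≤ x) && decide (x ≤ b) with hpdef
  cases hf : s.find? p with
  | none =>
    -- no in-range element
    have hfil : s.filter p = [] := by
      rw [find?_eq_head?_filter] at hf
      exact List.head?_eq_none_iff.mp hf
    have hlp : p (s.getLast hsne) = false := by
      have := List.find?_eq_none.mp hf
      have hmem := List.getLast_mem hsne
      by_cases hb : p (s.getLast hsne) = true
      · exact absurd hb (this _ hmem)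
      · simpa using hb
    have hnl : ¬ (a ≤ s.getLast hsne ∧ s.getLast hsne ≤ b) := by
      intro hcon
      simp [hpdef, hcon.1, hcon.2] at hlp
    rw [hfil]
    simp [PySem.List.min?, hnl]
  | some v =>
    have hpv : p v = true := List.find?_some hf
    have hvr : a ≤ v ∧ v ≤ b := by
      simp only [hpdef, Bool.and_eq_true, decide_eq_true_eq] at hpv; exact hpv
    -- A's guard is false
    have hguard : ¬ ((v : Int) = s.getLast hsne ∧ ¬ (a ≤ v ∧ v ≤ b)) := by
      intro hcon; exact hcon.2 hvr
    rw [Option.getD_some, if_neg hguard]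
    -- B's side: vals = v :: rest, min = v
    rw [find?_eq_head?_filter] at hf
    obtain ⟨rest, hfil⟩ : ∃ rest, s.filter p = v :: rest := by
      cases hc : s.filter p with
      | nil => rw [hc] at hf; simp at hf
      | cons y u =>
        rw [hc] at hf; simp at hf
        exact ⟨u, by rw [hf]⟩
    have hfp : (s.filter p).Pairwise (· ≤ ·) := List.Pairwise.filter p hs
    have hvle : ∀ y ∈ rest, v ≤ y := by
      rw [hfil] at hfp
      exact (List.pairwise_cons.mp hfp).1
    have hminfold : rest.foldl min v = v := by
      have h1 := PySem.List.foldl_min_le rest v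
      have h2 := PySem.List.foldl_min_mem rest v
      rcases h2 with h2 | h2
      · exact h2
      · have := hvle _ h2
        omega
    have hmin : PySem.List.min? (s.filter p) (fun x => x) = some v := by
      rw [hfil, PySem.List.min?_id_cons, hminfold]
    rw [hfil] at hmin ⊢
    rw [hmin]
    -- count over the filtered list equals count over s
    have hcnt : (v :: rest).count v = s.count v := by
      rw [← hfil, List.count_filter]
      simp [hpdef, hvr.1, hvr.2]
    simp only [PySem.List.count, hcnt]
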